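-- pv_equiv track=rewrite | github.com/ylu1997/Code_Generation_For_DNA_Storage | Data/data_validation.py | lcs_distance
-- ===== SOURCE A (Python) =====
-- def lcs_distance(s1, s2):
--     m, n = len(s1), len(s2)
--     dp = [[0] * (n + 1) for _ in range(m + 1)]
--     for i in range(1, m + 1):
--         for j in range(1, n + 1):
--             if s1[i - 1] == s2[j - 1]:
--                 dp[i][j] = dp[i - 1][j - 1] + 1
--             else:
--                 dp[i][j] = max(dp[i - 1][j], dp[i][j - 1])
--
--     lcs_length = dp[m][n]
--     lcs_distance = m + n - 2 * lcs_length
--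
--     return lcs_distance
-- ===== SOURCE B (Python) =====
-- def lcs_distance(s1, s2):
--     m, n = len(s1), len(s2)
--     memo = {}
--     stack = [(m, n, False)]
--     while stack:
--         i, j, ready = stack.pop()
--         if (i, j) in memo:
--             continue
--         if i == 0 or j == 0:
--             memo[(i, j)] = 0
--         elif ready:
--             if s1[i - 1] == s2[j - 1]:
--                 memo[(i, j)] = memo.get((i - 1, j - 1), 0) + 1
--             else:
--                 memo[(i, j)] = max(memo.get((i - 1, j), 0), memo.get((i, j - 1), 0))
--         else:
--             if s1[i - 1] == s2[j - 1]:
--                 children = [(i - 1, j - 1)]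
--             else:
--                 children = [(i - 1, j), (i, j - 1)]
--             stack.append((i, j, True))
--             for p in reversed(children):
--                 stack.append((p[0], p[1], False))
--     return m + n - 2 * memo[(m, n)]
-- ===== Notes on version B (the rewrite author's own statement) =====
-- stated objective: alternative
-- what changed: Replaces the bottom-up (m+1)x(n+1) DP table fill with a top-down memoized computation of LCS prefix lengths, driven by an explicit work stack of (i, j, ready) frames and a dict cache instead of nested index loops over a 2D list.
import Mathlib
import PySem

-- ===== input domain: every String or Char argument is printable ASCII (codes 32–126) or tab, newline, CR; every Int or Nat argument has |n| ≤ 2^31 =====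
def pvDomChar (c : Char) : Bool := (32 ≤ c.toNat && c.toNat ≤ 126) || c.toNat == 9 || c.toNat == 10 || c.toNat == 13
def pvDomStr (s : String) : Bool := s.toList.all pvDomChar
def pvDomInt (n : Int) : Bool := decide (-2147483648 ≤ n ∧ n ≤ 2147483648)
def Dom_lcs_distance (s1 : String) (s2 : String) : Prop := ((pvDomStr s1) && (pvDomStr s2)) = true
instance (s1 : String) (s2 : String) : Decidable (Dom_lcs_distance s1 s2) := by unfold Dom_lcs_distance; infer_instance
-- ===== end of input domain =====

-- B replaces A's bottom-up 2D DP table fill with a top-down memoized computation of the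
-- same LCS prefix lengths, driven by an explicit work stack and a dict cache (alternative
-- decomposition, same asymptotic cost); return values proved equal on all inputs.

-- ===== PORT A =====
-- dp[i][j] read / write on the list-of-lists table (indices always in range in A; exact there)
def pvCell (dp : List (List Int)) (i j : Nat) : Int := ((dp[i]?.getD [])[j]?).getD 0

def pvSetCell (dp : List (List Int)) (i j : Nat) (v : Int) : List (List Int) :=
  dp.set i ((dp[i]?.getD []).set j v)

-- body of A's inner loop (one cell update)
def pvStep (a b : List Char) (i : Nat) (dp : List (List Int)) (j : Nat) : List (List Int) :=
  if a[i-1]? == b[j-1]? then pvSetCell dp i j (pvCell dp (i-1) (j-1) + 1)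
  else pvSetCell dp i j (max (pvCell dp (i-1) j) (pvCell dp i (j-1)))

-- range(1, m+1) is ported by hand as List.range' 1 m (exact: both bounds nonnegative)
def lcs_distance (s1 : String) (s2 : String) : Int :=
  let a := s1.toList
  let b := s2.toList
  let m := a.length
  let n := b.length
  let dp0 : List (List Int) := List.replicate (m+1) (List.replicate (n+1) 0)
  let dp := (List.range' 1 m).foldl (fun dp i => (List.range' 1 n).foldl (pvStep a b i) dp) dp0
  (m : Int) + n - 2 * pvCell dp m n

-- ===== PORT B =====
-- the children a not-yet-ready frame (i, j) pushes (Source B's `children`; i, j ≥ 1 when used)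
def pvDeps (a b : List Char) (i j : Nat) : List (Nat × Nat) :=
  if a[i-1]? == b[j-1]? then [(i-1, j-1)] else [(i-1, j), (i, j-1)]

-- termination-measure weight of one stack frame (proof device for the while loop)
def pvFrameW : Nat × Nat × Bool → Nat
  | (i, j, false) => 5 ^ (i + j + 1)
  | (_, _, true) => 1

lemma pvFrameW_pos (f : Nat × Nat × Bool) : 1 ≤ pvFrameW f := by
  obtain ⟨i, j, ready⟩ := f
  cases ready
  · exact Nat.one_le_pow _ _ (by norm_num)
  · exact le_refl 1

lemma pvPush_lt (a b : List Char) (i j : Nat) (hi : 1 ≤ i) (hj : 1 ≤ j) :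
    (((pvDeps a b i j).map (fun p => (p.1, p.2, false))).map pvFrameW).sum + 1 < 5 ^ (i + j + 1) := by
  have hone : 1 ≤ 5 ^ (i + j) := Nat.one_le_pow _ _ (by norm_num)
  have hpow : 5 ^ (i + j - 1) ≤ 5 ^ (i + j) := Nat.pow_le_pow_right (by norm_num) (by omega)
  have h5 : 5 ^ (i + j + 1) = 5 * 5 ^ (i + j) := by rw [pow_succ]; ring
  unfold pvDeps
  split
  · simp only [List.map_cons, List.map_nil, List.sum_cons, List.sum_nil, pvFrameW]
    have : i - 1 + (j - 1) + 1 = i + j - 1 := by omega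
    rw [this]; omega
  · simp only [List.map_cons, List.map_nil, List.sum_cons, List.sum_nil, pvFrameW]
    have h2 : i - 1 + j + 1 = i + j := by omega
    have h3 : i + (j - 1) + 1 = i + j := by omega
    rw [h2, h3]; omega

-- Source B's while loop over the explicit stack; list head = top of the Python stack.
-- memo lookups in the ready branch are Source B's memo.get(..., 0).
def pvRun (a b : List Char) : List (Nat × Nat × Bool) → PySem.Dict (Nat × Nat) Int → PySem.Dict (Nat × Nat) Int
  | [], memo => memo
  | (i, j, ready) :: rest, memo =>
    if (memo.get? (i, j)).isSome then pvRun a b rest memo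
    else if i = 0 ∨ j = 0 then pvRun a b rest (memo.insert (i, j) 0)
    else if ready then
      pvRun a b rest (memo.insert (i, j)
        (if a[i-1]? == b[j-1]? then (memo.get? (i-1, j-1)).getD 0 + 1
         else max ((memo.get? (i-1, j)).getD 0) ((memo.get? (i, j-1)).getD 0)))
    else
      pvRun a b ((pvDeps a b i j).map (fun p => (p.1, p.2, false)) ++ (i, j, true) :: rest) memo
termination_by s _ => (s.map pvFrameW).sum
decreasing_by
  · have := pvFrameW_pos (i, j, ready); simp only [List.map_cons, List.sum_cons]; omega
  · have := pvFrameW_pos (i, j, ready); simp only [List.map_cons, List.sum_cons]; omega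
  · have := pvFrameW_pos (i, j, ready); simp only [List.map_cons, List.sum_cons]; omega
  · rename_i hs hz hr
    have hready : ready = false := by
      cases ready
      · rfl
      · exact absurd rfl hr
    subst hready
    have := pvPush_lt a b i j (by omega) (by omega)
    simp only [List.map_cons, List.map_append, List.sum_cons, List.sum_append, pvFrameW]
    omega

def lcs_distance_alt (s1 : String) (s2 : String) : Int :=
  let a := s1.toList
  let b := s2.toList
  let m := a.length
  let n := b.length
  let memo := pvRun a b [(m, n, false)] PySem.Dict.empty
  (m : Int) + n - 2 * (memo.get? (m, n)).getD 0

-- ===== PRECONDITION & SPEC =====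
def Spec_lcs_distance (s1 : String) (s2 : String) (out : Int) : Prop := out = lcs_distance_alt s1 s2
instance (s1 : String) (s2 : String) (out : Int) : Decidable (Spec_lcs_distance s1 s2 out) := by unfold Spec_lcs_distance; infer_instance

-- ===== CLAIM (what is proved, stated in full; the proofs are below) =====
def Claim_equal_lcs_distance : Prop := ∀ (s1 : String) (s2 : String), Dom_lcs_distance s1 s2 → Spec_lcs_distance s1 s2 (lcs_distance s1 s2)

-- ===== LEMMAS AND PROOFS =====

-- the mathematical LCS length of the first i chars of a and the first j chars of b;
-- both ports are proved to compute m + n - 2 * lcsLen a b m n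
def lcsLen (a b : List Char) : Nat → Nat → Int
  | 0, _ => 0
  | _+1, 0 => 0
  | i+1, j+1 =>
    if a[i]? == b[j]? then lcsLen a b i j + 1
    else max (lcsLen a b i (j+1)) (lcsLen a b (i+1) j)
termination_by i j => i + j

lemma lcsLen_zero (a b : List Char) (i j : Nat) (h : i = 0 ∨ j = 0) : lcsLen a b i j = 0 := by
  rcases h with h | h <;> subst h
  · simp [lcsLen]
  · cases i <;> simp [lcsLen]

lemma lcsLen_pos (a b : List Char) (i j : Nat) (hi : 1 ≤ i) (hj : 1 ≤ j) :
    lcsLen a b i j =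
      if a[i-1]? == b[j-1]? then lcsLen a b (i-1) (j-1) + 1
      else max (lcsLen a b (i-1) j) (lcsLen a b i (j-1)) := by
  obtain ⟨i', rfl⟩ : ∃ i', i = i' + 1 := ⟨i - 1, by omega⟩
  obtain ⟨j', rfl⟩ : ∃ j', j = j' + 1 := ⟨j - 1, by omega⟩
  simp [lcsLen]

-- ---------- port B: the stack loop computes lcsLen ----------
lemma pvRun_nil (a b : List Char) (μ : PySem.Dict (Nat × Nat) Int) : pvRun a b [] μ = μ := by
  rw [pvRun]

lemma pvRun_cons (a b : List Char) (i j : Nat) (ready : Bool) (rest : List (Nat × Nat × Bool))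
    (μ : PySem.Dict (Nat × Nat) Int) :
    pvRun a b ((i, j, ready) :: rest) μ =
    if (μ.get? (i, j)).isSome then pvRun a b rest μ
    else if i = 0 ∨ j = 0 then pvRun a b rest (μ.insert (i, j) 0)
    else if ready then
      pvRun a b rest (μ.insert (i, j)
        (if a[i-1]? == b[j-1]? then (μ.get? (i-1, j-1)).getD 0 + 1
         else max ((μ.get? (i-1, j)).getD 0) ((μ.get? (i, j-1)).getD 0)))
    else
      pvRun a b ((pvDeps a b i j).map (fun p => (p.1, p.2, false)) ++ (i, j, true) :: rest) μ := by
  rw [pvRun]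

lemma pvRun_append (a b : List Char) (t : List (Nat × Nat × Bool)) :
    ∀ (s : List (Nat × Nat × Bool)) (μ : PySem.Dict (Nat × Nat) Int),
      pvRun a b (s ++ t) μ = pvRun a b t (pvRun a b s μ) := by
  suffices H : ∀ (N : Nat) (s : List (Nat × Nat × Bool)) (μ : PySem.Dict (Nat × Nat) Int),
      (s.map pvFrameW).sum ≤ N → pvRun a b (s ++ t) μ = pvRun a b t (pvRun a b s μ) by
    exact fun s μ => H _ s μ le_rfl
  intro N
  induction N with
  | zero =>
    intro s μ h
    cases s with
    | nil => rw [List.nil_append, pvRun_nil]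
    | cons f rest =>
      exfalso
      have := pvFrameW_pos f
      simp only [List.map_cons, List.sum_cons] at h
      omega
  | succ N ih =>
    intro s μ h
    cases s with
    | nil => rw [List.nil_append, pvRun_nil]
    | cons f rest =>
      obtain ⟨i, j, ready⟩ := f
      have hw := pvFrameW_pos (i, j, ready)
      simp only [List.map_cons, List.sum_cons] at h
      rw [List.cons_append, pvRun_cons, pvRun_cons]
      by_cases h1 : (μ.get? (i, j)).isSome
      · simp only [h1, if_true]
        exact ih rest μ (by omega)
      · simp only [h1, if_false]
        by_cases h2 : i = 0 ∨ j = 0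
        · simp only [h2, if_true]
          exact ih rest _ (by omega)
        · simp only [h2, if_false]
          cases ready with
          | true =>
            simp only [if_true]
            exact ih rest _ (by omega)
          | false =>
            simp only [Bool.false_eq_true, if_false]
            have hre : (pvDeps a b i j).map (fun p => (p.1, p.2, false)) ++ (i, j, true) :: (rest ++ t)
                = ((pvDeps a b i j).map (fun p => (p.1, p.2, false)) ++ (i, j, true) :: rest) ++ t := by
              simp
            rw [hre]
            have hlt := pvPush_lt a b i j (by omega) (by omega)
            have hw2 : pvFrameW (i, j, false) = 5 ^ (i + j + 1) := rfl
            refine ih _ μ ?_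
            simp only [List.map_append, List.sum_append, List.map_cons, List.sum_cons, pvFrameW]
            omega

def MemoOK (a b : List Char) (μ : PySem.Dict (Nat × Nat) Int) : Prop :=
  ∀ i j v, μ.get? (i, j) = some v → v = lcsLen a b i j

def DSub (μ μ' : PySem.Dict (Nat × Nat) Int) : Prop :=
  ∀ k v, μ.get? k = some v → μ'.get? k = some v

lemma memoOK_insert (a b : List Char) (μ : PySem.Dict (Nat × Nat) Int) (i j : Nat) (v : Int)
    (hμ : MemoOK a b μ) (hv : v = lcsLen a b i j) : MemoOK a b (μ.insert (i, j) v) := by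
  intro i' j' w hw
  rw [PySem.Dict.get?_insert] at hw
  split at hw
  · rename_i hp
    obtain ⟨h1, h2⟩ := Prod.mk.injEq .. ▸ hp
    subst h1; subst h2
    cases hw; exact hv
  · exact hμ i' j' w hw

lemma dsub_insert (μ : PySem.Dict (Nat × Nat) Int) (p : Nat × Nat) (v : Int)
    (hnone : μ.get? p = none) : DSub μ (μ.insert p v) := by
  intro k w hw
  rw [PySem.Dict.get?_insert]
  split
  · rename_i hp; subst hp; rw [hnone] at hw; cases hw
  · exact hw

lemma dsub_trans {μ1 μ2 μ3 : PySem.Dict (Nat × Nat) Int} (h1 : DSub μ1 μ2) (h2 : DSub μ2 μ3) :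
    DSub μ1 μ3 := fun k v hv => h2 k v (h1 k v hv)

lemma pvRun_pair (a b : List Char) :
    ∀ (i j : Nat) (μ : PySem.Dict (Nat × Nat) Int), MemoOK a b μ →
      MemoOK a b (pvRun a b [(i, j, false)] μ) ∧
      DSub μ (pvRun a b [(i, j, false)] μ) ∧
      (pvRun a b [(i, j, false)] μ).get? (i, j) = some (lcsLen a b i j) := by
  suffices H : ∀ (N i j : Nat) (μ : PySem.Dict (Nat × Nat) Int), i + j ≤ N → MemoOK a b μ →
      MemoOK a b (pvRun a b [(i, j, false)] μ) ∧
      DSub μ (pvRun a b [(i, j, false)] μ) ∧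
      (pvRun a b [(i, j, false)] μ).get? (i, j) = some (lcsLen a b i j) by
    exact fun i j μ hμ => H (i + j) i j μ le_rfl hμ
  intro N
  induction N using Nat.strong_induction_on with
  | _ N ih =>
    intro i j μ hN hμ
    rw [pvRun_cons]
    by_cases hhit : (μ.get? (i, j)).isSome
    · simp only [hhit, if_true, pvRun_nil]
      obtain ⟨v, hv⟩ := Option.isSome_iff_exists.mp hhit
      refine ⟨hμ, fun k w hw => hw, ?_⟩
      rw [hv, hμ i j v hv]
    · have hnone : μ.get? (i, j) = none := Option.not_isSome_iff_eq_none.mp hhit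
      by_cases hbase : i = 0 ∨ j = 0
      · simp only [hhit, hbase, Bool.false_eq_true, if_false, if_true, pvRun_nil]
        exact ⟨memoOK_insert a b μ i j 0 hμ (lcsLen_zero a b i j hbase).symm,
               dsub_insert μ (i, j) 0 hnone, by
                 rw [PySem.Dict.get?_insert_self, lcsLen_zero a b i j hbase]⟩
      · have hi : 1 ≤ i := by omega
        have hj : 1 ≤ j := by omega
        have hij : 2 ≤ i + j := by omega
        simp only [hhit, hbase, Bool.false_eq_true, if_false]
        rw [pvRun_append]
        by_cases hc : (a[i-1]? == b[j-1]?) = true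
        · have hd : (pvDeps a b i j).map (fun p => (p.1, p.2, false)) = [(i-1, j-1, false)] := by
            simp [pvDeps, hc]
          rw [hd]
          obtain ⟨hM1, hS1, hG1⟩ := ih (i + j - 1) (by omega) (i-1) (j-1) μ (by omega) hμ
          rw [pvRun_cons]
          by_cases hhit1 : ((pvRun a b [(i-1, j-1, false)] μ).get? (i, j)).isSome
          · simp only [hhit1, if_true, pvRun_nil]
            obtain ⟨v, hv⟩ := Option.isSome_iff_exists.mp hhit1
            exact ⟨hM1, dsub_trans hS1 (fun k w hw => hw), by rw [hv, hM1 i j v hv]⟩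
          · have hnone1 : (pvRun a b [(i-1, j-1, false)] μ).get? (i, j) = none :=
              Option.not_isSome_iff_eq_none.mp hhit1
            simp only [hhit1, hbase, Bool.false_eq_true, if_false, if_true, pvRun_nil, hc,
              hG1, Option.getD_some]
            have hval : lcsLen a b (i-1) (j-1) + 1 = lcsLen a b i j := by
              rw [lcsLen_pos a b i j hi hj, if_pos hc]
            exact ⟨memoOK_insert a b _ i j _ hM1 hval,
                   dsub_trans hS1 (dsub_insert _ (i, j) _ hnone1), by
                     rw [PySem.Dict.get?_insert_self, hval]⟩
        · have hd : (pvDeps a b i j).map (fun p => (p.1, p.2, false))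
              = [(i-1, j, false)] ++ [(i, j-1, false)] := by
            simp [pvDeps, hc]
          rw [hd, pvRun_append]
          obtain ⟨hM1, hS1, hG1⟩ := ih (i + j - 1) (by omega) (i-1) j μ (by omega) hμ
          obtain ⟨hM2, hS2, hG2⟩ := ih (i + j - 1) (by omega) i (j-1) _ (by omega) hM1
          have hG1' : (pvRun a b [(i, j-1, false)] (pvRun a b [(i-1, j, false)] μ)).get? (i-1, j)
              = some (lcsLen a b (i-1) j) := hS2 _ _ hG1
          rw [pvRun_cons]
          by_cases hhit1 : ((pvRun a b [(i, j-1, false)] (pvRun a b [(i-1, j, false)] μ)).get? (i, j)).isSome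
          · simp only [hhit1, if_true, pvRun_nil]
            obtain ⟨v, hv⟩ := Option.isSome_iff_exists.mp hhit1
            exact ⟨hM2, dsub_trans hS1 (dsub_trans hS2 (fun k w hw => hw)), by rw [hv, hM2 i j v hv]⟩
          · have hnone1 : (pvRun a b [(i, j-1, false)] (pvRun a b [(i-1, j, false)] μ)).get? (i, j) = none :=
              Option.not_isSome_iff_eq_none.mp hhit1
            simp only [hhit1, hbase, Bool.false_eq_true, if_false, if_true, pvRun_nil, hc,
              hG1', hG2, Option.getD_some]
            have hval : max (lcsLen a b (i-1) j) (lcsLen a b i (j-1)) = lcsLen a b i j := by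
              rw [lcsLen_pos a b i j hi hj, if_neg hc]
            exact ⟨memoOK_insert a b _ i j _ hM2 hval,
                   dsub_trans hS1 (dsub_trans hS2 (dsub_insert _ (i, j) _ hnone1)), by
                     rw [PySem.Dict.get?_insert_self, hval]⟩

lemma lcs_distance_alt_eq (s1 s2 : String) :
    lcs_distance_alt s1 s2 =
      (s1.toList.length : Int) + s2.toList.length
        - 2 * lcsLen s1.toList s2.toList s1.toList.length s2.toList.length := by
  have h := (pvRun_pair s1.toList s2.toList s1.toList.length s2.toList.length PySem.Dict.empty
    (by intro i j v hv; simp [PySem.Dict.get?_empty] at hv)).2.2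
  unfold lcs_distance_alt
  simp only [h, Option.getD_some]

-- ---------- port A: the table fill computes lcsLen ----------
lemma pvSetCell_length (dp : List (List Int)) (i j : Nat) (v : Int) :
    (pvSetCell dp i j v).length = dp.length := by
  unfold pvSetCell; exact List.length_set ..

lemma pvSetCell_rows (dp : List (List Int)) (i j : Nat) (v : Int) (L : Nat)
    (hrows : ∀ r ∈ dp, r.length = L) (hi : i < dp.length) :
    ∀ r ∈ pvSetCell dp i j v, r.length = L := by
  intro r hr
  unfold pvSetCell at hr
  rcases List.mem_or_eq_of_mem_set hr with h | h
  · exact hrows r h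
  · subst h
    rw [List.length_set]
    have hdp : dp[i]? = some dp[i] := List.getElem?_eq_getElem hi
    simp [hdp, hrows dp[i] (List.mem_of_getElem? hdp)]

lemma pvCell_pvSetCell (dp : List (List Int)) (i j i' j' : Nat) (v : Int)
    (hi : i < dp.length) (L : Nat) (hrows : ∀ r ∈ dp, r.length = L) (hj : j < L) :
    pvCell (pvSetCell dp i j v) i' j' = if i' = i ∧ j' = j then v else pvCell dp i' j' := by
  have hdp : dp[i]? = some dp[i] := List.getElem?_eq_getElem hi
  have hrl : dp[i].length = L := hrows dp[i] (List.mem_of_getElem? hdp)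
  unfold pvSetCell pvCell
  by_cases he : i' = i
  · subst he
    rw [List.getElem?_set_self hi, hdp]
    simp only [Option.getD_some]
    by_cases hjj : j' = j
    · subst hjj
      rw [List.getElem?_set_self (by rw [hrl]; exact hj)]
      simp
    · rw [List.getElem?_set_ne (fun h => hjj h.symm)]
      simp [hjj]
  · rw [List.getElem?_set_ne (fun h => he h.symm)]
    simp [he]

def InvA (a b : List Char) (dp : List (List Int)) (i j : Nat) : Prop :=
  dp.length = a.length + 1 ∧ (∀ r ∈ dp, r.length = b.length + 1) ∧
  ∀ i' j', i' ≤ a.length → j' ≤ b.length →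
    pvCell dp i' j' =
      if i' = 0 ∨ j' = 0 ∨ i' < i ∨ (i' = i ∧ j' < j) then lcsLen a b i' j' else 0

lemma invA_step (a b : List Char) (dp : List (List Int)) (i j : Nat)
    (hi : 1 ≤ i) (him : i ≤ a.length) (hj : 1 ≤ j) (hjn : j ≤ b.length)
    (h : InvA a b dp i j) : InvA a b (pvStep a b i dp j) i (j+1) := by
  obtain ⟨hlen, hrows, hcells⟩ := h
  have hidp : i < dp.length := by omega
  have hjL : j < b.length + 1 := by omega
  have hread1 : pvCell dp (i-1) (j-1) = lcsLen a b (i-1) (j-1) := by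
    rw [hcells (i-1) (j-1) (by omega) (by omega)]
    exact if_pos (by omega)
  have hread2 : pvCell dp (i-1) j = lcsLen a b (i-1) j := by
    rw [hcells (i-1) j (by omega) (by omega)]
    exact if_pos (by omega)
  have hread3 : pvCell dp i (j-1) = lcsLen a b i (j-1) := by
    rw [hcells i (j-1) (by omega) (by omega)]
    exact if_pos (by omega)
  have main : ∀ v, v = lcsLen a b i j → InvA a b (pvSetCell dp i j v) i (j+1) := by
    intro v hv
    refine ⟨by rw [pvSetCell_length, hlen], pvSetCell_rows dp i j v _ hrows hidp, ?_⟩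
    intro i' j' hi' hj'
    rw [pvCell_pvSetCell dp i j i' j' v hidp _ hrows hjL]
    by_cases hp : i' = i ∧ j' = j
    · rw [if_pos hp, hv, hp.1, hp.2]
      exact (if_pos (by omega)).symm
    · rw [if_neg hp, hcells i' j' hi' hj']
      by_cases hc1 : i' = 0 ∨ j' = 0 ∨ i' < i ∨ (i' = i ∧ j' < j)
      · rw [if_pos hc1, if_pos (by omega)]
      · rw [if_neg hc1, if_neg (by omega)]
  unfold pvStep
  split
  · rename_i hc
    exact main _ (by rw [hread1, lcsLen_pos a b i j hi hj, if_pos hc])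
  · rename_i hc
    exact main _ (by rw [hread2, hread3, lcsLen_pos a b i j hi hj, if_neg hc])

lemma invA_inner (a b : List Char) (i : Nat) (hi : 1 ≤ i) (him : i ≤ a.length) :
    ∀ (k j : Nat) (dp : List (List Int)), 1 ≤ j → j + k ≤ b.length + 1 → InvA a b dp i j →
      InvA a b ((List.range' j k).foldl (pvStep a b i) dp) i (j + k) := by
  intro k
  induction k with
  | zero => intro j dp _ _ h; simpa using h
  | succ k ih =>
    intro j dp hj hjk h
    rw [List.range'_succ, List.foldl_cons]
    have h1 := invA_step a b dp i j hi him hj (by omega) h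
    have h2 := ih (j+1) (pvStep a b i dp j) (by omega) (by omega) h1
    have : j + (k + 1) = (j + 1) + k := by omega
    rw [this]
    exact h2

lemma invA_row_succ (a b : List Char) (dp : List (List Int)) (i : Nat)
    (h : InvA a b dp i (b.length + 1)) : InvA a b dp (i+1) 1 := by
  obtain ⟨hlen, hrows, hcells⟩ := h
  refine ⟨hlen, hrows, ?_⟩
  intro i' j' hi' hj'
  rw [hcells i' j' hi' hj']
  by_cases hc : i' = 0 ∨ j' = 0 ∨ i' < i ∨ (i' = i ∧ j' < b.length + 1)
  · rw [if_pos hc, if_pos (by omega)]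
  · rw [if_neg hc, if_neg (by omega)]

lemma invA_outer (a b : List Char) :
    ∀ (k i : Nat) (dp : List (List Int)), 1 ≤ i → i + k ≤ a.length + 1 → InvA a b dp i 1 →
      InvA a b ((List.range' i k).foldl
        (fun dp i => (List.range' 1 b.length).foldl (pvStep a b i) dp) dp) (i + k) 1 := by
  intro k
  induction k with
  | zero => intro i dp _ _ h; simpa using h
  | succ k ih =>
    intro i dp hi hik h
    rw [List.range'_succ, List.foldl_cons]
    have h1 := invA_inner a b i hi (by omega) b.length 1 dp le_rfl (by omega) h
    rw [Nat.add_comm 1 b.length] at h1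
    have h2 := invA_row_succ a b _ i h1
    have h3 := ih (i+1) _ (by omega) (by omega) h2
    have : i + (k + 1) = (i + 1) + k := by omega
    rw [this]
    exact h3

lemma invA_init (a b : List Char) :
    InvA a b (List.replicate (a.length+1) (List.replicate (b.length+1) 0)) 1 1 := by
  refine ⟨List.length_replicate, ?_, ?_⟩
  · intro r hr
    rw [List.eq_of_mem_replicate hr]
    exact List.length_replicate
  · intro i' j' hi' hj'
    have hcell : pvCell (List.replicate (a.length+1) (List.replicate (b.length+1) 0)) i' j' = 0 := by
      unfold pvCell
      rw [List.getElem?_replicate]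
      split
      · simp only [Option.getD_some]
        rw [List.getElem?_replicate]
        split <;> simp
      · simp
    rw [hcell]
    by_cases hc : i' = 0 ∨ j' = 0 ∨ i' < 1 ∨ (i' = 1 ∧ j' < 1)
    · rw [if_pos hc, lcsLen_zero a b i' j' (by omega)]
    · rw [if_neg hc]

lemma lcs_distance_eq (s1 s2 : String) :
    lcs_distance s1 s2 =
      (s1.toList.length : Int) + s2.toList.length
        - 2 * lcsLen s1.toList s2.toList s1.toList.length s2.toList.length := by
  have h := invA_outer s1.toList s2.toList s1.toList.length 1 _ le_rfl (by omega)
    (invA_init s1.toList s2.toList)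
  obtain ⟨hlen, hrows, hcells⟩ := h
  show (s1.toList.length : Int) + s2.toList.length - 2 *
      pvCell ((List.range' 1 s1.toList.length).foldl
        (fun dp i => (List.range' 1 s2.toList.length).foldl (pvStep s1.toList s2.toList i) dp)
        (List.replicate (s1.toList.length + 1) (List.replicate (s2.toList.length + 1) 0)))
      s1.toList.length s2.toList.length = _
  rw [hcells s1.toList.length s2.toList.length le_rfl le_rfl, if_pos (by omega)]

-- ===== VERDICT (by name: the statement is the Claim_ definition above) =====
theorem lcs_distance_spec : Claim_equal_lcs_distance := by
  intro s1 s2 _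
  unfold Spec_lcs_distance
  rw [lcs_distance_eq, lcs_distance_alt_eq]
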